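-- pv_equiv track=rewrite | github.com/tonii43/Undip-Praktikum | Pertemuan 12 (Lambda)/Responsi Daspro/perpustakaanAgung.py | cariTag
-- ===== SOURCE A (Python) =====
-- def FirstElmt(L):
--     return L[0]
--
-- def FirstList(LoL):
--     return LoL[0]
--
-- def TailList(LoL):
--     return LoL[1:]
--
-- def IsEmpty(LoL):
--     if LoL == []:
--         return True
--     else:
--         return False
--
-- def getTag(shelf):
--     return FirstElmt(FirstList(shelf))
--
-- def cariTag(shelves,tag) :
--     if IsEmpty(shelves):
--         return False
--     else:
--         if getTag(shelves) == tag :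
--             return True
--         else:
--             return cariTag(TailList(shelves),tag)
-- ===== SOURCE B (Python) =====
-- def cariTag(shelves, tag):
--     for shelf in shelves:
--         if shelf[0] == tag:
--             return True
--     return False
-- ===== Notes on version B (the rewrite author's own statement) =====
-- stated objective: simpler
-- what changed: Replaced the helper-based recursion (IsEmpty/getTag/TailList with repeated slicing) by a single direct iterative for-loop over the shelves with an early return.
import Mathlib
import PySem

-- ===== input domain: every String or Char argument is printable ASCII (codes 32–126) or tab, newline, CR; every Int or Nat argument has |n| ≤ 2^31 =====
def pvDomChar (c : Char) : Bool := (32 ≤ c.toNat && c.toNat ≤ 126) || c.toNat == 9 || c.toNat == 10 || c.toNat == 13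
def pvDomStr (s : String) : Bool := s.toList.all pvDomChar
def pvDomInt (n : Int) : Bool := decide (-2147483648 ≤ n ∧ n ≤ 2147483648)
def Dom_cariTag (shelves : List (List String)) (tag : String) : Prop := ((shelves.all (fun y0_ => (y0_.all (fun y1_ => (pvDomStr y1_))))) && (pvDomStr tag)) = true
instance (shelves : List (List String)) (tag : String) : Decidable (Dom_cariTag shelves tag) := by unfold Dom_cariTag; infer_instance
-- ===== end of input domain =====

-- B replaces A's helper-based recursion (slicing off the tail each step) by a direct iterative scan; return values agree wherever A returns.


-- ===== PORT A =====
-- getTag(shelf) = FirstElmt(FirstList(shelf)) = shelf[0][0]; none = IndexError (excluded by Pre_)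
def pvGetTag (shelf : List (List String)) : Option String :=
  (PySem.List.pyGet? shelf 0).bind (fun L => PySem.List.pyGet? L 0)

def cariTag (shelves : List (List String)) (tag : String) : Bool :=
  if shelves = [] then false                       -- IsEmpty(shelves)
  else if pvGetTag shelves = some tag then true    -- getTag(shelves) == tag
  else cariTag (PySem.List.slice shelves (some 1) none) tag   -- cariTag(TailList(shelves), tag)
termination_by shelves.length
decreasing_by
  rw [PySem.List.slice_from_one]
  cases shelves with
  | nil => simp_all
  | cons s rest => simp

-- ===== PORT B =====
def cariTag_alt (shelves : List (List String)) (tag : String) : Bool :=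
  match shelves with
  | [] => false
  | shelf :: rest =>
      if PySem.List.pyGet? shelf 0 = some tag then true   -- shelf[0] == tag (none = IndexError, excluded by Pre_)
      else cariTag_alt rest tag

-- ===== PRECONDITION & SPEC =====
-- Pre_ excludes exactly the inputs on which Python A raises IndexError: an empty shelf occurring
-- before (or at) the position of the first shelf whose first element equals tag.
def Pre_cariTag (shelves : List (List String)) (tag : String) : Prop :=
  [] ∉ shelves.takeWhile (fun s => s.head? ≠ some tag)
instance (shelves : List (List String)) (tag : String) : Decidable (Pre_cariTag shelves tag) := by unfold Pre_cariTag; infer_instance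

def pvWitness_cariTag : List (List String) × String := ([["abc"], ["xy", "z"]], "xy")

def Spec_cariTag (shelves : List (List String)) (tag : String) (out : Bool) : Prop := out = cariTag_alt shelves tag
instance (shelves : List (List String)) (tag : String) (out : Bool) : Decidable (Spec_cariTag shelves tag out) := by unfold Spec_cariTag; infer_instance

-- ===== CLAIM (what is proved, stated in full; the proofs are below) =====
def Claim_equal_cariTag : Prop := ∀ (shelves : List (List String)) (tag : String), Dom_cariTag shelves tag → Pre_cariTag shelves tag → Spec_cariTag shelves tag (cariTag shelves tag)

-- ===== LEMMAS AND PROOFS =====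
-- A = B even without Pre_: both ports compare the head string of the current shelf with tag.
theorem cariTag_eq_alt (shelves : List (List String)) (tag : String) :
    cariTag shelves tag = cariTag_alt shelves tag := by
  induction shelves with
  | nil => simp [cariTag, cariTag_alt]
  | cons s rest ih =>
      rw [cariTag]
      simp only [PySem.List.slice_from_one, List.tail_cons, reduceCtorEq, if_false]
      have h : pvGetTag (s :: rest) = PySem.List.pyGet? s 0 := by
        simp [pvGetTag, PySem.List.pyGet?, PySem.List.pyIdx?]
      rw [h, cariTag_alt]
      split <;> simp [ih]

-- ===== VERDICT (by name: the statement is the Claim_ definition above) =====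
theorem cariTag_spec : Claim_equal_cariTag := by
  intro shelves tag _ _
  unfold Spec_cariTag
  exact cariTag_eq_alt shelves tag
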